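-- pv_equiv track=rewrite | github.com/HourGlss/Chess | pieces/piece.py | forms_x
-- ===== SOURCE A (Python) =====
-- def forms_x(startx, starty, endx, endy):
--     for i in range(-7, 8, 1):
--         if startx + i == endx and starty + i == endy:
--             return True
--         elif startx - i == endx and starty - i == endy:
--             return True
--         elif startx - i == endx and starty + i == endy:
--             return True
--         elif startx + i == endx and starty - i == endy:
--             return True
--     return False
-- ===== SOURCE B (Python) =====
-- def forms_x(startx, starty, endx, endy):
--     dx = endx - startx
--     dy = endy - starty
--     return (dx == dy or dx == -dy) and dx in range(-7, 8)
-- ===== Notes on version B (the rewrite author's own statement) =====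
-- stated objective: simpler
-- what changed: Replaced the fixed 15-iteration scan over offsets with a closed-form test: dx == +-dy and dx within [-7,7] (range membership, matching the loop's integer-equality semantics).
import Mathlib
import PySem

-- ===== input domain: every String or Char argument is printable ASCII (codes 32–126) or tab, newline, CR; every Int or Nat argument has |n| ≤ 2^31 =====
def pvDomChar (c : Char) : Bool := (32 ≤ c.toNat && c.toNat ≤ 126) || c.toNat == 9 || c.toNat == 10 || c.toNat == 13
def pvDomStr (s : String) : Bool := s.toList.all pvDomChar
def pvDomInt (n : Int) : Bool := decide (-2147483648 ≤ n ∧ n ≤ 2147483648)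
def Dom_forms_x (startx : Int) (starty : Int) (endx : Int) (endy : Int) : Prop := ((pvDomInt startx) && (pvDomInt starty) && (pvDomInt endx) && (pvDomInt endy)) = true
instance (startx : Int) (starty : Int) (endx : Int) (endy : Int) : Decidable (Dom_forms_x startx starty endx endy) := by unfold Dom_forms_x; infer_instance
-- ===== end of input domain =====

-- B replaces A's fixed 15-iteration offset scan with the closed-form test dx = ±dy ∧ dx ∈ [-7,7] (simpler).


-- ===== PORT A =====
-- Literal port of A: scan i over range(-7, 8, 1); any match of the four branches returns True.
def forms_x (startx : Int) (starty : Int) (endx : Int) (endy : Int) : Bool :=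
  (PySem.List.pyRange (-7) 8 1).any (fun i =>
    (startx + i == endx && starty + i == endy) ||
    (startx - i == endx && starty - i == endy) ||
    (startx - i == endx && starty + i == endy) ||
    (startx + i == endx && starty - i == endy))

-- ===== PORT B =====
-- Port of B: closed-form diagonal test, dx = ±dy and dx ∈ [-7,7].
def forms_x_alt (startx : Int) (starty : Int) (endx : Int) (endy : Int) : Bool :=
  let dx := endx - startx
  let dy := endy - starty
  (dx == dy || dx == -dy) && (-7 ≤ dx && dx < 8)

-- ===== PRECONDITION & SPEC =====
def Spec_forms_x (startx : Int) (starty : Int) (endx : Int) (endy : Int) (out : Bool) : Prop := out = forms_x_alt startx starty endx endy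
instance (startx : Int) (starty : Int) (endx : Int) (endy : Int) (out : Bool) : Decidable (Spec_forms_x startx starty endx endy out) := by unfold Spec_forms_x; infer_instance

-- ===== CLAIM (what is proved, stated in full; the proofs are below) =====
def Claim_equal_forms_x : Prop := ∀ (startx : Int) (starty : Int) (endx : Int) (endy : Int), Dom_forms_x startx starty endx endy → Spec_forms_x startx starty endx endy (forms_x startx starty endx endy)

-- ===== LEMMAS AND PROOFS =====

-- ===== VERDICT (by name: the statement is the Claim_ definition above) =====
theorem forms_x_spec : Claim_equal_forms_x := by
  intro startx starty endx endy _
  unfold Spec_forms_x forms_x forms_x_alt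
  rw [Bool.eq_iff_iff]
  simp only [List.any_eq_true, PySem.List.mem_pyRange_one, Bool.or_eq_true, Bool.and_eq_true,
    beq_iff_eq, decide_eq_true_eq]
  constructor
  · rintro ⟨i, ⟨hi1, hi2⟩, h⟩
    rcases h with (⟨h1,h2⟩|⟨h1,h2⟩)|⟨h1,h2⟩|⟨h1,h2⟩ <;> omega
  · rintro ⟨h, hlo, hhi⟩
    refine ⟨endx - startx, ⟨hlo, hhi⟩, ?_⟩
    rcases h with h|h
    · exact Or.inl (Or.inl (Or.inl ⟨by omega, by omega⟩))
    · exact Or.inr ⟨by omega, by omega⟩
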